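-- pv_equiv track=rewrite | github.com/NVIDIA/NVFlare | nvflare/tool/poc/poc_commands.py | client_gpu_assignments
-- ===== SOURCE A (Python) =====
-- from typing import Any, Dict, List, Optional, OrderedDict, Tuple
--
-- def client_gpu_assignments(clients: List[str], gpu_ids: List[int]) -> Dict[str, List[int]]:
--     n_gpus = len(gpu_ids)
--     n_clients = len(clients)
--     gpu_assignments = {}
--     if n_gpus == 0:
--         for client in clients:
--             gpu_assignments[client] = []
--
--     if 0 < n_gpus <= n_clients:
--         for client_id, client in enumerate(clients):
--             gpu_index = client_id % n_gpus
--             gpu_assignments[client] = [gpu_ids[gpu_index]]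
--     elif n_gpus > n_clients > 0:
--         client_name_map = {}
--         for client_id, client in enumerate(clients):
--             client_name_map[client_id] = client
--
--         for gpu_index, gpu_id in enumerate(gpu_ids):
--             client_id = gpu_index % n_clients
--             client = client_name_map[client_id]
--             if client not in gpu_assignments:
--                 gpu_assignments[client] = []
--             gpu_assignments[client].append(gpu_id)
--     return gpu_assignments
-- ===== SOURCE B (Python) =====
-- from typing import Dict, List
--
-- def client_gpu_assignments(clients: List[str], gpu_ids: List[int]) -> Dict[str, List[int]]:
--     n_gpus = len(gpu_ids)
--     n_clients = len(clients)
--     if n_gpus == 0: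
--         return {client: [] for client in clients}
--     if n_gpus <= n_clients:
--         return {client: [gpu_ids[i % n_gpus]] for i, client in enumerate(clients)}
--     # more GPUs than clients: client i takes every n_clients-th gpu starting at i
--     return {client: [g for j, g in enumerate(gpu_ids) if j % n_clients == i]
--             for i, client in enumerate(clients)}
-- ===== Notes on version B (the rewrite author's own statement) =====
-- stated objective: simpler
-- what changed: B replaces A's mutate-a-dict pipeline (a separate n_gpus==0 loop, a client_name_map index dict, and a single pass over gpu_ids appending into the dict keyed by gpu_index % n_clients) by three early-return dict comprehensions driven by the client axis: in the surplus-GPU case each client i directly collects the gpus whose index is congruent to i mod n_clients.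
-- outside the precondition, e.g. on client_gpu_assignments(['a', 'a'], [1, 2, 3]): A returns {'a': [1, 2, 3]}, B returns {'a': [2]}
import Mathlib
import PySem

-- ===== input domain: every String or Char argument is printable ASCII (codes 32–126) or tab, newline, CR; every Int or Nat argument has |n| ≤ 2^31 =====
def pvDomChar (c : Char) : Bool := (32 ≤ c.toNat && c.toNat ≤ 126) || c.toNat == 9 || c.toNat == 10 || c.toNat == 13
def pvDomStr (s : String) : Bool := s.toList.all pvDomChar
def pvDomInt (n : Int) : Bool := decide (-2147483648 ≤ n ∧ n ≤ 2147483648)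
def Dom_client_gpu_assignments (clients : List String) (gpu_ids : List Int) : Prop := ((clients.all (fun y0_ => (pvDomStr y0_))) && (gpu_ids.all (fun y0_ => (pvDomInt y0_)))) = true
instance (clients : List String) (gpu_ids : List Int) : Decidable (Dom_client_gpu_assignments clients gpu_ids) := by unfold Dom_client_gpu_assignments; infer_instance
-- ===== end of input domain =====

-- B rewrites A's dict-mutation pipeline as three client-driven dict comprehensions (same values; simpler decomposition, not faster).


-- ===== PORT A =====
def client_gpu_assignments (clients : List String) (gpu_ids : List Int) : List (String × List Int) :=
  let n_gpus : Int := gpu_ids.length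
  let n_clients : Int := clients.length
  let gpu_assignments : PySem.Dict String (List Int) := PySem.Dict.empty
  let gpu_assignments :=
    if n_gpus = 0 then
      clients.foldl (fun d client => d.insert client []) gpu_assignments
    else gpu_assignments
  if 0 < n_gpus ∧ n_gpus ≤ n_clients then
    ((PySem.List.enumerate clients).foldl
      (fun d p =>
        let gpu_index := PySem.Int.mod p.1 n_gpus
        -- gpu_index is always in range here, so the default 0 is never used
        d.insert p.2 [PySem.List.pyGetD gpu_ids gpu_index 0]) gpu_assignments).items
  else if n_gpus > n_clients ∧ n_clients > 0 then
    let client_name_map : PySem.Dict Int String :=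
      (PySem.List.enumerate clients).foldl (fun m p => m.insert p.1 p.2) PySem.Dict.empty
    ((PySem.List.enumerate gpu_ids).foldl
      (fun d p =>
        let client_id := PySem.Int.mod p.1 n_clients
        -- client_id is always a key of client_name_map here, so no KeyError and "" is never used
        let client := (client_name_map.get? client_id).getD ""
        let d := if d.contains client then d else d.insert client []
        d.insert client (d.getD client [] ++ [p.2])) gpu_assignments).items
  else gpu_assignments.items

-- ===== PORT B =====
def client_gpu_assignments_alt (clients : List String) (gpu_ids : List Int) : List (String × List Int) :=
  let n_gpus : Int := gpu_ids.length
  let n_clients : Int := clients.length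
  if n_gpus = 0 then
    (clients.foldl (fun d client => d.insert client [])
      (PySem.Dict.empty : PySem.Dict String (List Int))).items
  else if n_gpus ≤ n_clients then
    ((PySem.List.enumerate clients).foldl
      -- the index is always in range here, so the default 0 is never used
      (fun d p => d.insert p.2 [PySem.List.pyGetD gpu_ids (PySem.Int.mod p.1 n_gpus) 0])
      (PySem.Dict.empty : PySem.Dict String (List Int))).items
  else
    ((PySem.List.enumerate clients).foldl
      (fun d p => d.insert p.2
        (((PySem.List.enumerate gpu_ids).filter (fun q => PySem.Int.mod q.1 n_clients == p.1)).map (·.2)))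
      (PySem.Dict.empty : PySem.Dict String (List Int))).items

-- ===== PRECONDITION & SPEC =====
-- Pre_ excludes clients lists with duplicate names when there are more GPUs than clients: there the
-- dict-key collision is a corner nobody specifies (A merges all duplicate positions' GPU strides into
-- the single key, B keeps the last position's stride), so those inputs are outside the claim.
def Pre_client_gpu_assignments (clients : List String) (gpu_ids : List Int) : Prop :=
  clients.Nodup ∨ gpu_ids.length ≤ clients.length
instance (clients : List String) (gpu_ids : List Int) : Decidable (Pre_client_gpu_assignments clients gpu_ids) := by unfold Pre_client_gpu_assignments; infer_instance
def pvWitness_client_gpu_assignments : List String × List Int := (["site-1", "site-2"], [0, 1, 2])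

def Spec_client_gpu_assignments (clients : List String) (gpu_ids : List Int) (out : List (String × List Int)) : Prop := out = client_gpu_assignments_alt clients gpu_ids
instance (clients : List String) (gpu_ids : List Int) (out : List (String × List Int)) : Decidable (Spec_client_gpu_assignments clients gpu_ids out) := by unfold Spec_client_gpu_assignments; infer_instance

-- ===== CLAIM (what is proved, stated in full; the proofs are below) =====
def Claim_equal_client_gpu_assignments : Prop := ∀ (clients : List String) (gpu_ids : List Int), Dom_client_gpu_assignments clients gpu_ids → Pre_client_gpu_assignments clients gpu_ids → Spec_client_gpu_assignments clients gpu_ids (client_gpu_assignments clients gpu_ids)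

-- ===== LEMMAS AND PROOFS =====

lemma pv_mod_natCast (k n : Nat) : PySem.Int.mod (k : Int) (n : Int) = ((k % n : Nat) : Int) := by
  simp [PySem.Int.mod, Int.fmod_eq_emod]

lemma pv_cmap_get (clients : List String) (i : Nat) (h : i < clients.length) :
    ((PySem.List.enumerate clients).foldl (fun m p => m.insert p.1 p.2)
      (PySem.Dict.empty : PySem.Dict Int String)).get? (i : Int) = some clients[i] := by
  have hfst : (List.map (fun (p : Int × String) => p.1) (PySem.List.enumerate clients (0:Int))).Nodup :=
    List.pairwise_map.mpr ((PySem.List.pairwise_lt_enumerate clients 0).imp (fun hlt => ne_of_lt hlt))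
  have hitems := PySem.Dict.items_foldl_insert_fresh (PySem.List.enumerate clients)
      (fun (p : Int × String) => p.1) (fun p => p.2) (PySem.Dict.empty : PySem.Dict Int String)
      (fun a _ => PySem.Dict.contains_empty _) hfst
  have hnk : ((PySem.List.enumerate clients).foldl (fun m p => m.insert p.1 p.2)
      (PySem.Dict.empty : PySem.Dict Int String)).keys.Nodup :=
    PySem.Dict.nodup_keys_foldl_insert_key _ (fun (p : Int × String) => p.1) (fun _ p => p.2) _
      List.nodup_nil
  apply PySem.Dict.get?_of_mem_items _ _ hnk
  rw [hitems]
  have : ((i:Int), clients[i]) ∈ PySem.List.enumerate clients := by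
    rw [PySem.List.mem_enumerate_iff]
    exact ⟨i, h, by simp⟩
  exact List.mem_map.mpr ⟨_, this, rfl⟩

theorem pv_branch3 (clients : List String) (gpu_ids : List Int)
    (hnd : clients.Nodup) (h0 : 0 < clients.length) (hlt : clients.length < gpu_ids.length) :
    ((PySem.List.enumerate gpu_ids).foldl
      (fun d p =>
        let client_id := PySem.Int.mod p.1 (clients.length : Int)
        let client := (((PySem.List.enumerate clients).foldl (fun m p => m.insert p.1 p.2)
            (PySem.Dict.empty : PySem.Dict Int String)).get? client_id).getD ""
        let d := if d.contains client then d else d.insert client []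
        d.insert client (d.getD client [] ++ [p.2])) (PySem.Dict.empty : PySem.Dict String (List Int))).items
    = ((PySem.List.enumerate clients).foldl
        (fun d p => d.insert p.2
          (((PySem.List.enumerate gpu_ids).filter
            (fun q => PySem.Int.mod q.1 (clients.length : Int) == p.1)).map (·.2)))
        (PySem.Dict.empty : PySem.Dict String (List Int))).items := by
  set n := clients.length with hn
  set m := gpu_ids.length with hm
  -- the key (client name) each gpu pair goes to
  set key : Int × Int → String := fun p => clients.getD (PySem.Int.mod p.1 (n : Int)).toNat "" with hkey
  -- Step 1: A's loop body is a Dict.modify at `key p`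
  have hcongr : (PySem.List.enumerate gpu_ids).foldl
      (fun d p =>
        let client_id := PySem.Int.mod p.1 (n : Int)
        let client := (((PySem.List.enumerate clients).foldl (fun m p => m.insert p.1 p.2)
            (PySem.Dict.empty : PySem.Dict Int String)).get? client_id).getD ""
        let d := if d.contains client then d else d.insert client []
        d.insert client (d.getD client [] ++ [p.2])) (PySem.Dict.empty : PySem.Dict String (List Int))
      = (PySem.List.enumerate gpu_ids).foldl
        (fun d p => d.modify (key p) [] (fun v => v ++ [p.2]))
        (PySem.Dict.empty : PySem.Dict String (List Int)) := by
    apply PySem.List.foldl_congr_mem'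
    intro p hp d
    rcases (PySem.List.mem_enumerate_iff gpu_ids 0 p).mp hp with ⟨k, hk, rfl⟩
    dsimp only
    have hmod : PySem.Int.mod ((0:Int) + (k:Int)) (n:Int) = ((k % n : Nat) : Int) := by
      rw [zero_add, pv_mod_natCast]
    have hkn : k % n < n := Nat.mod_lt _ h0
    have hget : (((PySem.List.enumerate clients).foldl (fun m p => m.insert p.1 p.2)
        (PySem.Dict.empty : PySem.Dict Int String)).get? (((k % n : Nat) : Int))).getD ""
        = clients[k % n] := by rw [pv_cmap_get clients (k % n) hkn]; rfl
    rw [hmod, hget]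
    have hkeyp : key ((0:Int) + (k:Int), gpu_ids[k]) = clients[k % n] := by
      simp only [hkey, hmod, Int.toNat_natCast]
      exact List.getD_eq_getElem _ _ hkn
    rw [hkeyp]
    by_cases hc : d.contains clients[k % n]
    · rw [if_pos hc]; rfl
    · rw [if_neg hc]
      show (d.insert clients[k % n] []).insert clients[k % n]
          ((d.insert clients[k % n] []).getD clients[k % n] [] ++ [gpu_ids[k]])
        = d.modify clients[k % n] [] (fun v => v ++ [gpu_ids[k]])
      rw [PySem.Dict.getD_insert_self, PySem.Dict.insert_insert_self]
      show d.insert clients[k % n] ([] ++ [gpu_ids[k]]) = d.insert clients[k % n] ((d.getD clients[k % n] []) ++ [gpu_ids[k]])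
      rw [PySem.Dict.getD_of_not_contains d [] (by simpa using hc)]
  rw [hcongr]
  -- Step 2: the keys of A's dict are exactly `clients`, in order
  have hnames : (PySem.List.enumerate gpu_ids).map key
      = (List.range m).map (fun k => clients.getD (k % n) "") := by
    apply List.ext_getElem
    · simp [PySem.List.length_enumerate, hm]
    · intro i h1 h2
      simp only [List.getElem_map, List.getElem_range, PySem.List.getElem_enumerate, hkey]
      rw [zero_add, pv_mod_natCast, Int.toNat_natCast]
  have hofl : PySem.Set.ofList ((List.range m).map (fun k => clients.getD (k % n) "")) = clients := by
    have hm' : m = n + (m - n) := by omega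
    rw [hm', List.range_add, List.map_append]
    have h1 : (List.range n).map (fun k => clients.getD (k % n) "") = clients := by
      apply List.ext_getElem
      · simp [hn]
      · intro i hi1 hi2
        simp only [List.getElem_map, List.getElem_range]
        rw [Nat.mod_eq_of_lt (by simpa using hi2), List.getD_eq_getElem _ _ (by simpa using hi2)]
    rw [h1, PySem.Set.ofList_append, PySem.Set.ofList_eq_self_of_nodup _ hnd,
        PySem.Set.update_eq_append_filter]
    have h2 : List.filter (fun y => !PySem.Set.contains clients y)
        (PySem.Set.ofList ((List.map (fun x => n + x) (List.range (m - n))).map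
          (fun k => clients.getD (k % n) ""))) = [] := by
      rw [List.filter_eq_nil_iff]
      intro y hy
      have hy' := (PySem.Set.mem_ofList _ _).mp hy
      rcases List.mem_map.mp hy' with ⟨k, _, rfl⟩
      have hkn : k % n < n := Nat.mod_lt _ h0
      rw [List.getD_eq_getElem _ _ hkn]
      simp [PySem.Set.contains_eq_listContains]
    rw [h2, List.append_nil]
  have hkeys : ((PySem.List.enumerate gpu_ids).foldl
      (fun d p => d.modify (key p) [] (fun v => v ++ [p.2]))
      (PySem.Dict.empty : PySem.Dict String (List Int))).keys = clients := by
    rw [PySem.Dict.keys_foldl_modify_key (PySem.List.enumerate gpu_ids) key []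
        (fun _ p => fun v => v ++ [p.2]) PySem.Dict.empty]
    rw [PySem.Dict.keys_empty, PySem.Set.update_nil_left, hnames, hofl]
  have hnodupk : ((PySem.List.enumerate gpu_ids).foldl
      (fun d p => d.modify (key p) [] (fun v => v ++ [p.2]))
      (PySem.Dict.empty : PySem.Dict String (List Int))).keys.Nodup := hkeys ▸ hnd
  -- Step 3: A's items as a map over clients
  have hAitems : ((PySem.List.enumerate gpu_ids).foldl
      (fun d p => d.modify (key p) [] (fun v => v ++ [p.2]))
      (PySem.Dict.empty : PySem.Dict String (List Int))).items
      = clients.map (fun c => (c, ((PySem.List.enumerate gpu_ids).foldl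
          (fun d p => d.modify (key p) [] (fun v => v ++ [p.2]))
          (PySem.Dict.empty : PySem.Dict String (List Int))).getD c [])) := by
    rw [PySem.Dict.items_eq_map_keys _ hnodupk [], hkeys]
  -- Step 4: A's per-client value is a filter of the gpu list
  have hgetD : ∀ c, ((PySem.List.enumerate gpu_ids).foldl
      (fun d p => d.modify (key p) [] (fun v => v ++ [p.2]))
      (PySem.Dict.empty : PySem.Dict String (List Int))).getD c []
      = (((PySem.List.enumerate gpu_ids).filter (fun q => key q == c)).map (·.2)) := by
    intro c
    have hfold2 : (PySem.List.enumerate gpu_ids).foldl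
        (fun d p => d.modify (key p) [] (fun v => v ++ [p.2]))
        (PySem.Dict.empty : PySem.Dict String (List Int))
        = ((PySem.List.enumerate gpu_ids).map (fun p => (key p, p.2))).foldl
          (fun d q => d.modify q.1 [] (fun v => v ++ [q.2])) PySem.Dict.empty := by
      rw [List.foldl_map]
    rw [hfold2, PySem.Dict.getD_foldl_modify_append, PySem.Dict.getD_empty, List.nil_append,
        List.filter_map, List.map_map]
    rfl
  -- Step 5: B's items
  have hBitems := PySem.Dict.items_foldl_insert_fresh (PySem.List.enumerate clients)
      (fun (p : Int × String) => p.2)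
      (fun p => (((PySem.List.enumerate gpu_ids).filter
          (fun q => PySem.Int.mod q.1 (n : Int) == p.1)).map (·.2)))
      (PySem.Dict.empty : PySem.Dict String (List Int))
      (fun a _ => PySem.Dict.contains_empty _)
      (by rw [PySem.List.map_snd_enumerate]; exact hnd)
  rw [hAitems, hBitems]
  -- Step 6: the two maps agree entry by entry
  apply List.ext_getElem
  · simp [PySem.List.length_enumerate, hn,
      show (PySem.Dict.empty : PySem.Dict String (List Int)).items = [] from rfl]
  · intro i h1 h2
    have hi : i < clients.length := by simpa using h1
    simp only [show (PySem.Dict.empty : PySem.Dict String (List Int)).items = [] from rfl,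
      List.nil_append, List.getElem_map, PySem.List.getElem_enumerate]
    rw [hgetD]
    refine Prod.ext rfl ?_
    show (((PySem.List.enumerate gpu_ids).filter (fun q => key q == clients[i])).map (·.2))
      = (((PySem.List.enumerate gpu_ids).filter
          (fun q => PySem.Int.mod q.1 (n : Int) == (0 : Int) + (i : Int))).map (·.2))
    congr 1
    apply List.filter_congr
    intro q hq
    rcases (PySem.List.mem_enumerate_iff gpu_ids 0 q).mp hq with ⟨k, hk, rfl⟩
    have hkn : k % n < n := Nat.mod_lt _ h0
    have hkeyq : key ((0:Int) + (k:Int), gpu_ids[k]) = clients[k % n] := by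
      simp only [hkey, zero_add, pv_mod_natCast, Int.toNat_natCast]
      exact List.getD_eq_getElem _ _ hkn
    rw [hkeyq]
    show (clients[k % n] == clients[i]) = (PySem.Int.mod ((0:Int) + (k:Int)) (n:Int) == (0:Int) + (i:Int))
    rw [zero_add, zero_add, pv_mod_natCast]
    by_cases he : k % n = i
    · simp [he]
    · have hne : clients[k % n] ≠ clients[i] := by
        intro hEq
        exact he (hnd.getElem_inj_iff.mp hEq)
      simp [hne]
      omega

-- ===== VERDICT (by name: the statement is the Claim_ definition above) =====
theorem client_gpu_assignments_spec : Claim_equal_client_gpu_assignments := by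
  intro clients gpu_ids _ hpre
  unfold Spec_client_gpu_assignments client_gpu_assignments client_gpu_assignments_alt
  dsimp only
  by_cases hm0 : (gpu_ids.length : Int) = 0
  · simp only [hm0, if_true]
    have : ¬ ((0:Int) < 0 ∧ (0:Int) ≤ (clients.length:Int)) := by omega
    rw [if_neg this]
    have : ¬ ((0:Int) > (clients.length:Int) ∧ (clients.length:Int) > 0) := by omega
    rw [if_neg this]
  · rw [if_neg hm0, if_neg hm0]
    by_cases hmn : (gpu_ids.length : Int) ≤ (clients.length : Int)
    · have h1 : (0:Int) < (gpu_ids.length:Int) ∧ (gpu_ids.length:Int) ≤ (clients.length:Int) := by omega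
      rw [if_pos h1, if_pos hmn]
    · rw [if_neg (by omega : ¬ ((0:Int) < (gpu_ids.length:Int) ∧ (gpu_ids.length:Int) ≤ (clients.length:Int))), if_neg hmn]
      by_cases hn0 : clients.length = 0
      · rw [if_neg (by omega : ¬ ((gpu_ids.length:Int) > (clients.length:Int) ∧ (clients.length:Int) > 0))]
        rcases List.eq_nil_iff_length_eq_zero.mpr hn0 with rfl
        simp [PySem.List.enumerate]
      · rw [if_pos (by omega : (gpu_ids.length:Int) > (clients.length:Int) ∧ (clients.length:Int) > 0)]
        have hnd : clients.Nodup := by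
          rcases hpre with h | h
          · exact h
          · omega
        exact (pv_branch3 clients gpu_ids hnd (by omega) (by omega)).symm ▸ rfl
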